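-- pv_equiv track=rewrite | github.com/sakshi3861/Synapse-Tasks | Task3.py | best_bomb_spot
-- ===== SOURCE A (Python) =====
-- def best_bomb_spot(grid, m):
--     n = len(grid)
--     best_count = 0
--     best_positions = []
--     offset = m // 2
--
--     for i in range(n - m + 1):
--         for j in range(n - m + 1):
--             ci, cj = i + offset, j + offset
--             if grid[ci][cj] != 1:
--                 continue
--
--             count = 0
--             destroyed = []
--             for di in range(m):
--                 for dj in range(m):
--                     r, c = i + di, j + dj
--                     if grid[r][c] == 1:
--                         count += 1
--                         destroyed.append((r, c))
--
--             if count > best_count: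
--                 best_count = count
--                 best_positions = destroyed
--
--     return best_count, best_positions
-- ===== SOURCE B (Python) =====
-- def best_bomb_spot(grid, m):
--     n = len(grid)
--     # per-row prefix counts of ones: pre[r][k] = number of 1s among row r's first k cells
--     pre = []
--     for row in grid:
--         acc = [0]
--         s = 0
--         for x in row:
--             s += 1 if x == 1 else 0
--             acc.append(s)
--         pre.append(acc)
--     offset = m // 2
--     best_count = 0
--     best_pos = None
--     for i in range(n - m + 1):
--         for j in range(n - m + 1):
--             if grid[i + offset][j + offset] != 1:
--                 continue
--             count = 0
--             for di in range(m):
--                 p = pre[i + di]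
--                 count += p[j + m] - p[j]
--             if count > best_count:
--                 best_count = count
--                 best_pos = (i, j)
--     if best_pos is None:
--         return 0, []
--     bi, bj = best_pos
--     destroyed = [(r, c) for r in range(bi, bi + m)
--                  for c in range(bj, bj + m) if grid[r][c] == 1]
--     return best_count, destroyed
-- ===== Notes on version B (the rewrite author's own statement) =====
-- stated objective: alternative
-- what changed: B precomputes per-row prefix counts of ones and counts each m x m window from m prefix differences instead of rescanning the m^2 cells, tracks only the best window's coordinates during the scan, and reconstructs the destroyed-cell list once at the end for the winning window only.
import Mathlib
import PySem

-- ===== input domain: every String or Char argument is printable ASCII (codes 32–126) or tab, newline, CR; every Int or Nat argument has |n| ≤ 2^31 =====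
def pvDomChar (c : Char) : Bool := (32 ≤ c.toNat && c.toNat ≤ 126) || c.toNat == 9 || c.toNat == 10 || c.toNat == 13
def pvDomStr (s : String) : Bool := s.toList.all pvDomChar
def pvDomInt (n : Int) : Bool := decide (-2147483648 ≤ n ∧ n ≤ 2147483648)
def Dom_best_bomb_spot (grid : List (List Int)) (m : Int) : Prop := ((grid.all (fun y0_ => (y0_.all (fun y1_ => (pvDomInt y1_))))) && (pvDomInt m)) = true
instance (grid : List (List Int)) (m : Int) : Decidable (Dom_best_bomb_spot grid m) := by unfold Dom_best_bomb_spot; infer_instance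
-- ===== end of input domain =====

-- B replaces A's per-window m x m recount (and per-window list building) by per-row
-- prefix counts of ones and a single reconstruction of the destroyed list for the best
-- window; objective: alternative algorithm, same return value.

-- ===== PORT A =====
-- grid[r][c] in total form; Pre_best_bomb_spot excludes every input on which this
-- access raises IndexError in Python, so the default is never taken under Pre_.
def pvCell (grid : List (List Int)) (r c : Int) : Int :=
  PySem.List.pyGetD (PySem.List.pyGetD grid r []) c 0

def best_bomb_spot (grid : List (List Int)) (m : Int) : Int × (List (Int × Int)) :=
  let n : Int := PySem.List.len grid
  let offset : Int := PySem.Int.floordiv m 2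
  (PySem.List.pyRange 0 (n - m + 1) 1).foldl (fun st i =>
    (PySem.List.pyRange 0 (n - m + 1) 1).foldl (fun st j =>
      if pvCell grid (i + offset) (j + offset) ≠ 1 then st
      else
        let cd := (PySem.List.pyRange 0 m 1).foldl (fun cd di =>
          (PySem.List.pyRange 0 m 1).foldl (fun cd dj =>
            if pvCell grid (i + di) (j + dj) == 1 then
              (cd.1 + 1, cd.2 ++ [(i + di, j + dj)])
            else cd) cd) ((0 : Int), ([] : List (Int × Int)))
        if cd.1 > st.1 then cd else st) st) ((0 : Int), ([] : List (Int × Int)))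

-- ===== PORT B =====
-- acc = [0]; s = 0; for x in row: s += 1 if x == 1 else 0; acc.append(s)
def pvRowPrefix (row : List Int) : List Int :=
  (row.foldl (fun (st : List Int × Int) x =>
    let s := st.2 + (if x == 1 then (1 : Int) else 0)
    (st.1 ++ [s], s)) ([0], 0)).1

def best_bomb_spot_alt (grid : List (List Int)) (m : Int) : Int × (List (Int × Int)) :=
  let n : Int := PySem.List.len grid
  let pre := grid.foldl (fun ps row => ps ++ [pvRowPrefix row]) ([] : List (List Int))
  let offset : Int := PySem.Int.floordiv m 2
  let best := (PySem.List.pyRange 0 (n - m + 1) 1).foldl (fun (st : Int × Option (Int × Int)) i =>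
    (PySem.List.pyRange 0 (n - m + 1) 1).foldl (fun st j =>
      if pvCell grid (i + offset) (j + offset) ≠ 1 then st
      else
        let count := (PySem.List.pyRange 0 m 1).foldl (fun c di =>
          let p := PySem.List.pyGetD pre (i + di) []
          c + PySem.List.pyGetD p (j + m) 0 - PySem.List.pyGetD p j 0) 0
        if count > st.1 then (count, some (i, j)) else st) st)
    ((0 : Int), (none : Option (Int × Int)))
  match best.2 with
  | none => (0, [])
  | some (bi, bj) =>
    let destroyed := (PySem.List.pyRange bi (bi + m) 1).foldl (fun acc r =>
      (PySem.List.pyRange bj (bj + m) 1).foldl (fun acc c =>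
        if pvCell grid r c == 1 then acc ++ [(r, c)] else acc) acc)
      ([] : List (Int × Int))
    (best.1, destroyed)

-- ===== PRECONDITION & SPEC =====
-- Pre_ admits exactly the inputs on which Python A returns: m ≥ 1 (for m ≤ 0 A always
-- raises IndexError), every window centre it inspects is in range, and for every window
-- whose centre is 1 the whole window is in range.
def Pre_best_bomb_spot (grid : List (List Int)) (m : Int) : Prop :=
  1 ≤ m ∧
  ∀ i ∈ PySem.List.pyRange 0 (PySem.List.len grid - m + 1) 1,
  ∀ j ∈ PySem.List.pyRange 0 (PySem.List.len grid - m + 1) 1,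
    (j + PySem.Int.floordiv m 2 <
      PySem.List.len (PySem.List.pyGetD grid (i + PySem.Int.floordiv m 2) [])) ∧
    (pvCell grid (i + PySem.Int.floordiv m 2) (j + PySem.Int.floordiv m 2) = 1 →
      ∀ di ∈ PySem.List.pyRange 0 m 1,
        j + m ≤ PySem.List.len (PySem.List.pyGetD grid (i + di) []))
instance (grid : List (List Int)) (m : Int) : Decidable (Pre_best_bomb_spot grid m) := by
  unfold Pre_best_bomb_spot; infer_instance

def pvWitness_best_bomb_spot : List (List Int) × Int := ([[1, 0], [0, 1]], 2)

def Spec_best_bomb_spot (grid : List (List Int)) (m : Int) (out : Int × (List (Int × Int))) : Prop := out = best_bomb_spot_alt grid m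
instance (grid : List (List Int)) (m : Int) (out : Int × (List (Int × Int))) : Decidable (Spec_best_bomb_spot grid m out) := by unfold Spec_best_bomb_spot; infer_instance

-- ===== CLAIM (what is proved, stated in full; the proofs are below) =====
def Claim_equal_best_bomb_spot : Prop := ∀ (grid : List (List Int)) (m : Int), Dom_best_bomb_spot grid m → Pre_best_bomb_spot grid m → Spec_best_bomb_spot grid m (best_bomb_spot grid m)

-- ===== LEMMAS AND PROOFS =====


-- running counts of ones: pvPsums s row = list of partial sums starting from s
def pvInd (x : Int) : Int := if x == 1 then 1 else 0

def pvPsums (s : Int) : List Int → List Int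
  | [] => []
  | x :: xs => (s + pvInd x) :: pvPsums (s + pvInd x) xs

lemma pvRowPrefix_fold (row : List Int) (acc : List Int) (s : Int) :
    row.foldl (fun (st : List Int × Int) x =>
      (st.1 ++ [st.2 + (if x == 1 then (1 : Int) else 0)],
       st.2 + (if x == 1 then (1 : Int) else 0))) (acc, s)
    = (acc ++ pvPsums s row, s + ((row.countP (· == 1) : Nat) : Int)) := by
  induction row generalizing acc s with
  | nil => simp [pvPsums]
  | cons x xs ih =>
      simp only [List.foldl_cons, List.countP_cons, pvPsums, ih, pvInd, Prod.mk.injEq]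
      refine ⟨by simp, ?_⟩
      by_cases h : x == 1 <;> simp [h] <;> push_cast <;> ring

lemma pvRowPrefix_eq (row : List Int) : pvRowPrefix row = 0 :: pvPsums 0 row := by
  have := pvRowPrefix_fold row [0] 0
  simp only [pvRowPrefix]
  rw [this]
  simp

lemma pvPrefix_getD (row : List Int) (s : Int) (k : Nat) (hk : k ≤ row.length) :
    (s :: pvPsums s row).getD k 0 = s + (((row.take k).countP (· == 1) : Nat) : Int) := by
  induction row generalizing s k with
  | nil =>
      have hk0 : k = 0 := by simpa using hk
      subst hk0
      simp [pvPsums]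
  | cons x xs ih =>
      cases k with
      | zero => simp
      | succ k =>
          simp only [pvPsums, List.getD_cons_succ]
          have := ih (s + pvInd x) k (by simpa using hk)
          simp only [pvPsums] at this ⊢
          rw [show ((s + pvInd x) :: pvPsums (s + pvInd x) xs).getD k 0
              = (s + pvInd x) + (((xs.take k).countP (· == 1) : Nat) : Int) from this]
          simp only [List.take_succ_cons, List.countP_cons, pvInd]
          by_cases h : x == 1 <;> simp [h] <;> push_cast <;> ring

-- number of ones in row[J : J+M], indexed form
def pvCnt (row : List Int) (J M : Nat) : Int :=
  (((List.range M).countP (fun k => row.getD (J + k) 0 == 1) : Nat) : Int)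

lemma pvSeg (row : List Int) (J M : Nat) (h : J + M ≤ row.length) :
    ((row.take (J + M)).countP (· == 1) : Int) - ((row.take J).countP (· == 1) : Int)
      = pvCnt row J M := by
  induction M with
  | zero => simp [pvCnt]
  | succ M ih =>
      have hJM : J + M < row.length := by omega
      have h1 : row.take (J + (M + 1)) = row.take (J + M) ++ [row[J + M]] := by
        rw [show J + (M + 1) = (J + M) + 1 from rfl, List.take_add_one]
        simp [List.getElem?_eq_getElem hJM]
      have hget : row.getD (J + M) 0 = row[J + M] := by
        simp [List.getD_eq_getElem?_getD, List.getElem?_eq_getElem hJM]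
      have hpc : pvCnt row J (M + 1) = pvCnt row J M
          + (if row[J + M] == 1 then (1 : Int) else 0) := by
        simp only [pvCnt, List.range_succ, List.countP_append, List.countP_cons,
          List.countP_nil, hget]
        by_cases hx : row[J + M] == 1 <;> simp [hx]
      have := ih (by omega)
      rw [h1, List.countP_append, hpc]
      by_cases hx : row[J + M] == 1 <;> simp only [hx, List.countP_cons, List.countP_nil,
        if_true] <;> push_cast <;> push_cast at this <;> omega

lemma pvDiff (row : List Int) (J M : Nat) (h : J + M ≤ row.length) :
    (0 :: pvPsums 0 row).getD (J + M) 0 - (0 :: pvPsums 0 row).getD J 0 = pvCnt row J M := by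
  rw [pvPrefix_getD row 0 (J + M) h, pvPrefix_getD row 0 J (by omega)]
  have := pvSeg row J M h
  omega

-- A's inner dj-loop over one row, as a count of ones in that row segment
lemma pvRowFoldA (row : List Int) (j : Int) (hj : 0 ≤ j) (m : Int) (c : Int) :
    (PySem.List.pyRange 0 m 1).foldl
      (fun c dj => if PySem.List.pyGetD row (j + dj) 0 == 1 then c + 1 else c) c
    = c + pvCnt row j.toNat m.toNat := by
  rw [PySem.List.pyRange_one, List.foldl_map]
  rw [PySem.List.foldl_congr_mem (List.range (m - 0).toNat) _
    (fun c k => if row.getD (j.toNat + k) 0 == 1 then c + 1 else c) c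
    (by
      intro c k _
      have h1 : j + ((0 : Int) + (k : Int)) = ((j.toNat + k : Nat) : Int) := by omega
      rw [h1, PySem.List.pyGetD_natCast])]
  rw [PySem.List.foldl_if_add_one]
  simp [pvCnt]

-- A's inner window loop, split into its count and its destroyed list
def pvCntW (grid : List (List Int)) (m i j : Int) : Int :=
  (PySem.List.pyRange 0 m 1).foldl (fun c di =>
    (PySem.List.pyRange 0 m 1).foldl (fun c dj =>
      if pvCell grid (i + di) (j + dj) == 1 then c + 1 else c) c) 0

def pvLstW (grid : List (List Int)) (m i j : Int) : List (Int × Int) :=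
  (PySem.List.pyRange 0 m 1).foldl (fun l di =>
    (PySem.List.pyRange 0 m 1).foldl (fun l dj =>
      if pvCell grid (i + di) (j + dj) == 1 then l ++ [(i + di, j + dj)] else l) l) []

lemma pvInnerA_eq (grid : List (List Int)) (m i j : Int) :
    (PySem.List.pyRange 0 m 1).foldl (fun cd di =>
      (PySem.List.pyRange 0 m 1).foldl (fun cd dj =>
        if pvCell grid (i + di) (j + dj) == 1 then
          (cd.1 + 1, cd.2 ++ [(i + di, j + dj)])
        else cd) cd) ((0 : Int), ([] : List (Int × Int)))
    = (pvCntW grid m i j, pvLstW grid m i j) := by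
  have hin : ∀ (di : Int) (cd : Int × List (Int × Int)),
      (PySem.List.pyRange 0 m 1).foldl (fun cd dj =>
        if pvCell grid (i + di) (j + dj) == 1 then
          (cd.1 + 1, cd.2 ++ [(i + di, j + dj)])
        else cd) cd
      = ((PySem.List.pyRange 0 m 1).foldl (fun c dj =>
          if pvCell grid (i + di) (j + dj) == 1 then c + 1 else c) cd.1,
         (PySem.List.pyRange 0 m 1).foldl (fun l dj =>
          if pvCell grid (i + di) (j + dj) == 1 then l ++ [(i + di, j + dj)] else l) cd.2) := by
    intro di cd
    have hstep : (fun (cd : Int × List (Int × Int)) dj =>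
        if pvCell grid (i + di) (j + dj) == 1 then
          (cd.1 + 1, cd.2 ++ [(i + di, j + dj)])
        else cd)
      = (fun (cd : Int × List (Int × Int)) dj =>
          ((if pvCell grid (i + di) (j + dj) == 1 then cd.1 + 1 else cd.1),
           (if pvCell grid (i + di) (j + dj) == 1 then cd.2 ++ [(i + di, j + dj)] else cd.2))) := by
      funext cd dj
      by_cases h : pvCell grid (i + di) (j + dj) == 1 <;> simp [h]
    rw [hstep]
    rcases cd with ⟨a, b⟩
    rw [PySem.List.foldl_prod_mk
      (f := fun a dj => if pvCell grid (i + di) (j + dj) == 1 then a + 1 else a)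
      (g := fun l dj => if pvCell grid (i + di) (j + dj) == 1 then l ++ [(i + di, j + dj)] else l)]
  calc (PySem.List.pyRange 0 m 1).foldl (fun cd di =>
      (PySem.List.pyRange 0 m 1).foldl (fun cd dj =>
        if pvCell grid (i + di) (j + dj) == 1 then
          (cd.1 + 1, cd.2 ++ [(i + di, j + dj)])
        else cd) cd) ((0 : Int), ([] : List (Int × Int)))
      = (PySem.List.pyRange 0 m 1).foldl (fun (cd : Int × List (Int × Int)) di =>
          ((PySem.List.pyRange 0 m 1).foldl (fun c dj =>
            if pvCell grid (i + di) (j + dj) == 1 then c + 1 else c) cd.1,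
           (PySem.List.pyRange 0 m 1).foldl (fun l dj =>
            if pvCell grid (i + di) (j + dj) == 1 then l ++ [(i + di, j + dj)] else l) cd.2))
          ((0 : Int), ([] : List (Int × Int))) := by
        exact PySem.List.foldl_congr_mem _ _ _ _ (fun cd di _ => hin di cd)
    _ = (pvCntW grid m i j, pvLstW grid m i j) := by
        rw [PySem.List.foldl_prod_mk
          (f := fun (c : Int) di => (PySem.List.pyRange 0 m 1).foldl (fun c dj =>
            if pvCell grid (i + di) (j + dj) == 1 then c + 1 else c) c)
          (g := fun (l : List (Int × Int)) di => (PySem.List.pyRange 0 m 1).foldl (fun l dj =>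
            if pvCell grid (i + di) (j + dj) == 1 then l ++ [(i + di, j + dj)] else l) l)]
        rfl

-- B's reconstruction loop (ranges bi..bi+m, bj..bj+m) is A's destroyed list for that window
lemma pvRecon_eq (grid : List (List Int)) (m bi bj : Int) :
    (PySem.List.pyRange bi (bi + m) 1).foldl (fun acc r =>
      (PySem.List.pyRange bj (bj + m) 1).foldl (fun acc c =>
        if pvCell grid r c == 1 then acc ++ [(r, c)] else acc) acc)
      ([] : List (Int × Int))
    = pvLstW grid m bi bj := by
  simp [pvLstW, PySem.List.pyRange_one, List.foldl_map]

-- per-window count equality (B reads it off the prefix lists)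
lemma pvCount_eq (grid : List (List Int)) (m i j : Int)
    (hi0 : 0 ≤ i) (hi1 : i < (grid.length : Int) - m + 1) (hj : 0 ≤ j)
    (hcols : ∀ di ∈ PySem.List.pyRange 0 m 1,
      j + m ≤ PySem.List.len (PySem.List.pyGetD grid (i + di) [])) :
    (PySem.List.pyRange 0 m 1).foldl (fun c di =>
      c + PySem.List.pyGetD (PySem.List.pyGetD (grid.map pvRowPrefix) (i + di) []) (j + m) 0
        - PySem.List.pyGetD (PySem.List.pyGetD (grid.map pvRowPrefix) (i + di) []) j 0) 0
    = pvCntW grid m i j := by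
  unfold pvCntW
  apply PySem.List.foldl_congr_mem
  intro c di hdi
  rw [PySem.List.mem_pyRange_one] at hdi
  have hr0 : 0 ≤ i + di := by omega
  have hr1 : i + di < (grid.length : Int) := by omega
  have hilen : (i + di).toNat < grid.length := by omega
  have hrow : PySem.List.pyGetD grid (i + di) [] = grid[(i + di).toNat]'hilen := by
    exact PySem.List.pyGetD_eq_getElem grid [] hr0 (by exact_mod_cast hr1)
  have hpre : PySem.List.pyGetD (grid.map pvRowPrefix) (i + di) []
      = pvRowPrefix (grid[(i + di).toNat]'hilen) := by
    rw [PySem.List.pyGetD_eq_getElem (grid.map pvRowPrefix) [] hr0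
      (by simpa using hr1)]
    simp
  set row := grid[(i + di).toNat]'hilen with hrowdef
  have hlen : j + m ≤ (row.length : Int) := by
    have := hcols di (by rw [PySem.List.mem_pyRange_one]; omega)
    rw [hrow] at this
    simpa using this
  rw [hpre, pvRowPrefix_eq]
  rw [PySem.List.pyGetD_of_nonneg (0 :: pvPsums 0 row) 0 (show (0:Int) ≤ j + m by omega),
      PySem.List.pyGetD_of_nonneg (0 :: pvPsums 0 row) 0 hj]
  have hm0 : 0 ≤ m := by omega
  have htn : (j + m).toNat = j.toNat + m.toNat := by omega
  have hd := pvDiff row j.toNat m.toNat (by omega)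
  rw [htn]
  simp only [pvCell, hrow]
  rw [pvRowFoldA row j hj m c]
  omega

-- the simulation invariant between A's state (count, destroyed) and B's (count, best_pos)
def pvInv (grid : List (List Int)) (m : Int)
    (a : Int × List (Int × Int)) (b : Int × Option (Int × Int)) : Prop :=
  a.1 = b.1 ∧ (b.2 = none → b.1 = 0 ∧ a.2 = []) ∧
    ∀ bi bj, b.2 = some (bi, bj) → a.2 = pvLstW grid m bi bj

-- fold two loops in lockstep under a relation
lemma pvFoldlRel {α β γ : Type} (R : α → β → Prop) (L : List γ)
    (f : α → γ → α) (g : β → γ → β)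
    (h : ∀ a b x, x ∈ L → R a b → R (f a x) (g b x)) :
    ∀ a b, R a b → R (L.foldl f a) (L.foldl g b) := by
  induction L with
  | nil => intro a b hab; simpa using hab
  | cons x xs ih =>
      intro a b hab
      simp only [List.foldl_cons]
      exact ih (fun a b y hy => h a b y (List.mem_cons_of_mem x hy)) _ _
        (h a b x (List.mem_cons_self) hab)

-- ===== VERDICT (by name: the statement is the Claim_ definition above) =====
theorem best_bomb_spot_spec : Claim_equal_best_bomb_spot := by
  intro grid m _hdom hpre
  obtain ⟨hm, hwin⟩ := hpre
  unfold Spec_best_bomb_spot best_bomb_spot best_bomb_spot_alt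
  simp only []
  rw [show grid.foldl (fun ps row => ps ++ [pvRowPrefix row]) ([] : List (List Int))
      = grid.map pvRowPrefix by
    rw [PySem.List.foldl_append_singleton_eq_map]; simp]
  set n : Int := PySem.List.len grid with hn
  set off : Int := PySem.Int.floordiv m 2 with hoff
  set R := PySem.List.pyRange 0 (n - m + 1) 1 with hR
  set fA := fun (st : Int × List (Int × Int)) i =>
    R.foldl (fun st j =>
      if pvCell grid (i + off) (j + off) ≠ 1 then st
      else
        let cd := (PySem.List.pyRange 0 m 1).foldl (fun cd di =>
          (PySem.List.pyRange 0 m 1).foldl (fun cd dj =>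
            if pvCell grid (i + di) (j + dj) == 1 then
              (cd.1 + 1, cd.2 ++ [(i + di, j + dj)])
            else cd) cd) ((0 : Int), ([] : List (Int × Int)))
        if cd.1 > st.1 then cd else st) st with hfA
  set fB := fun (st : Int × Option (Int × Int)) i =>
    R.foldl (fun st j =>
      if pvCell grid (i + off) (j + off) ≠ 1 then st
      else
        let count := (PySem.List.pyRange 0 m 1).foldl (fun c di =>
          let p := PySem.List.pyGetD (grid.map pvRowPrefix) (i + di) []
          c + PySem.List.pyGetD p (j + m) 0 - PySem.List.pyGetD p j 0) 0
        if count > st.1 then (count, some (i, j)) else st) st with hfB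
  have hlen : n = (grid.length : Int) := by simp [hn]
  have key : ∀ (a : Int × List (Int × Int)) (b : Int × Option (Int × Int)),
      pvInv grid m a b → pvInv grid m (R.foldl fA a) (R.foldl fB b) := by
    apply pvFoldlRel
    intro a b i hiR hab
    simp only [hfA, hfB]
    apply pvFoldlRel
    intro a b j hjR hab
    by_cases hc : pvCell grid (i + off) (j + off) ≠ 1
    · simp only [hc, ite_not]
      simpa [hc] using hab
    · push_neg at hc
      rw [if_neg (not_not_intro hc), if_neg (not_not_intro hc)]
      rw [pvInnerA_eq grid m i j]
      have hiR' := PySem.List.mem_pyRange_one.mp hiR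
      have hjR' := PySem.List.mem_pyRange_one.mp hjR
      have hcols := (hwin i hiR j hjR).2 hc
      rw [pvCount_eq grid m i j hiR'.1 (by rw [← hlen]; exact hiR'.2) hjR'.1 hcols]
      obtain ⟨h1, h2, h3⟩ := hab
      by_cases hgt : pvCntW grid m i j > a.1
      · rw [← h1]
        simp only [hgt, if_true, pvInv]
        refine ⟨by simp, by simp, ?_⟩
        intro bi bj hbi
        have hij : i = bi ∧ j = bj := by simpa using hbi
        rw [← hij.1, ← hij.2]
      · rw [← h1]
        simp only [hgt, if_false]
        exact ⟨h1, h2, h3⟩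
    exact hab
  have key0 := key (0, []) (0, none) (by
    exact ⟨rfl, fun _ => ⟨rfl, rfl⟩, fun bi bj h => by simp at h⟩)
  obtain ⟨h1, h2, h3⟩ := key0
  rcases hb : (R.foldl fB (0, none)) with ⟨bc, bo⟩
  rw [hb] at h1 h2 h3
  cases bo with
  | none =>
      obtain ⟨hz, he⟩ := h2 rfl
      simp only []
      refine Prod.ext ?_ ?_
      · rw [h1]; exact hz
      · simpa using he
  | some p =>
      rcases p with ⟨bi, bj⟩
      simp only []
      rw [pvRecon_eq grid m bi bj]
      refine Prod.ext ?_ ?_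
      · simpa using h1
      · simpa using h3 bi bj rfl
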